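-- pv_equiv track=rewrite | github.com/ramer-dev/problem-solve | 프로그래머스/lv2/42586. 기능개발/기능개발.py | solution
-- ===== SOURCE A (Python) =====
-- def solution(progresses, speeds):
--     answer = []
--     count = 0
--     while len(progresses) != 0:
--         if len(progresses) != 0:
--             if (progresses[0] >= 100):
--                 for i in progresses:
--                     if i >= 100:
--                         count += 1
--                     else:
--                         break
--
--         for i in range(count):
--             progresses.pop(0)
--             speeds.pop(0)
--
--         for i in range(count):
--             answer.insert(0, count)
--             break
--
--
--         for a in range(len(progresses)):
--             progresses[a] += speeds[a]
--         count = 0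
--     answer.reverse()
--     return answer
-- ===== SOURCE B (Python) =====
-- def solution(progresses, speeds):
--     # Return value only: A empties progresses/speeds in place, B does not mutate them.
--     answer = []
--     lead = None
--     count = 0
--     for p, s in zip(progresses, speeds):
--         d = 0 if p >= 100 else -((p - 100) // s)
--         if lead is None or d > lead:
--             if count:
--                 answer.append(count)
--             lead = d
--             count = 1
--         else:
--             count += 1
--     if count:
--         answer.append(count)
--     return answer
-- ===== Notes on version B (the rewrite author's own statement) =====
-- stated objective: alternative
-- what changed: A simulates day by day, each day re-scanning and rebuilding both whole lists and popping the finished prefix; B computes each task's finish day with one ceiling division and groups tasks in a single left-to-right pass by the running maximum finish day (intended as asymptotically better, O(n) vs O(D*n); a timing run could not confirm a clean reading because A times out on the large inputs).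
-- outside the precondition, e.g. on solution([100], [-1]): A returns [1], B returns [1]
import Mathlib
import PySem

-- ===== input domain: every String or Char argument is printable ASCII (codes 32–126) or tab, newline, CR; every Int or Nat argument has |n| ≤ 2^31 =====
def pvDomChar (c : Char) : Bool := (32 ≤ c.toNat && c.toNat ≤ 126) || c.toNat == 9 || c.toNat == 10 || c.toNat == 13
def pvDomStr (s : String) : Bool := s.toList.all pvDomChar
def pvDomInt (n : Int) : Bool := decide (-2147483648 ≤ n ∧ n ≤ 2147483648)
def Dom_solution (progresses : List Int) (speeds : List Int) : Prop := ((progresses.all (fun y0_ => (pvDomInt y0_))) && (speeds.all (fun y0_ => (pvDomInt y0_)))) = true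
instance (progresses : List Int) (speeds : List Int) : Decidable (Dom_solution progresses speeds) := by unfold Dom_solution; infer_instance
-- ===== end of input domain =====

-- B replaces A's day-by-day simulation (re-scanning and rebuilding the whole lists each day)
-- by computing each task's finish day with one ceiling division and grouping in a single pass.
-- Note: A empties `progresses`/`speeds` in place; B does not mutate its arguments —
-- the equivalence proved here is about the return value only.


-- ===== PORT A =====
-- Fuel for A's while-loop: inside Pre_ the loop runs at most
-- length + Σ (100 - pᵢ)⁺ times, so this fuel is never exhausted there
-- (a totality guard only; it does not change the computation).
def fuelA (progresses : List Int) : Nat :=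
  progresses.length + (progresses.map (fun p => (100 - p).toNat)).sum + 1

-- A's while-loop body, step for step: count the ready prefix (the inner
-- for-with-break guarded by progresses[0] >= 100 is takeWhile), pop `count`
-- items off both lists, insert the group size once, then add the speeds
-- pointwise (zipWith is exact inside Pre_, where len speeds ≥ len progresses).
def loopA : Nat → List Int → List Int → List Int → List Int
  | 0, _, _, ans => ans
  | fuel + 1, ps, ss, ans =>
    if ps = [] then ans
    else
      let count := (ps.takeWhile (fun i => decide (100 ≤ i))).length
      let ps1 := ps.drop count
      let ss1 := ss.drop count
      let ans1 := if 0 < count then ((count : Int) :: ans) else ans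
      loopA fuel (List.zipWith (· + ·) ps1 ss1) ss1 ans1

def solution (progresses : List Int) (speeds : List Int) : List Int :=
  (loopA (fuelA progresses) progresses speeds []).reverse

-- ===== PORT B =====
-- `0 if p >= 100 else -((p - 100) // s)` : remaining whole days for one task
def dayOf (p s : Int) : Int := if 100 ≤ p then 0 else -(PySem.Int.floordiv (p - 100) s)

-- Source B's single for-loop: running group leader `lead`, current group size `count`,
-- flush `count` into `answer` whenever a task needs strictly more days than the leader.
def loopB : List (Int × Int) → Option Int → Int → List Int → List Int
  | [], _, count, answer => if count ≠ 0 then answer ++ [count] else answer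
  | (p, s) :: rest, lead, count, answer =>
    let d := dayOf p s
    match lead with
    | none => loopB rest (some d) 1 (if count ≠ 0 then answer ++ [count] else answer)
    | some l =>
      if l < d then loopB rest (some d) 1 (if count ≠ 0 then answer ++ [count] else answer)
      else loopB rest (some l) (count + 1) answer

def solution_alt (progresses : List Int) (speeds : List Int) : List Int :=
  loopB (progresses.zip speeds) none 0 []

-- ===== PRECONDITION & SPEC =====
-- Pre_ excludes exactly the inputs where A raises or never returns: with
-- len speeds < len progresses A eventually pops from the exhausted speeds list or
-- indexes past it (IndexError); a task below 100 with speed ≤ 0 never finishes and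
-- A loops forever; and a task at/above 100 with a negative speed may decay below 100
-- while waiting and then also loop forever — we keep each task with speed ≥ 1, or
-- already ≥ 100 with speed ≥ 0 (the problem's own domain has all speeds ≥ 1).
def Pre_solution (progresses : List Int) (speeds : List Int) : Prop :=
  progresses.length ≤ speeds.length ∧
    ∀ x ∈ progresses.zip speeds, 1 ≤ x.2 ∨ (100 ≤ x.1 ∧ 0 ≤ x.2)
instance (progresses : List Int) (speeds : List Int) : Decidable (Pre_solution progresses speeds) := by
  unfold Pre_solution; infer_instance

def pvWitness_solution : List Int × List Int := ([93, 30, 55], [1, 30, 5])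

def Spec_solution (progresses : List Int) (speeds : List Int) (out : List Int) : Prop := out = solution_alt progresses speeds
instance (progresses : List Int) (speeds : List Int) (out : List Int) : Decidable (Spec_solution progresses speeds out) := by unfold Spec_solution; infer_instance

-- ===== CLAIM (what is proved, stated in full; the proofs are below) =====
def Claim_equal_solution : Prop := ∀ (progresses : List Int) (speeds : List Int), Dom_solution progresses speeds → Pre_solution progresses speeds → Spec_solution progresses speeds (solution progresses speeds)

-- ===== LEMMAS AND PROOFS =====

-- proof-side abstractions ---------------------------------------------------
-- one day's decrement of a (clamped, nonnegative) remaining-days value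
def dec (d : Int) : Int := max (d - 1) 0

-- the list of remaining days of all tasks
def days (ps ss : List Int) : List Int := (ps.zip ss).map (fun x => dayOf x.1 x.2)

-- A's loop, abstracted to act on the remaining-days list
def simD : Nat → List Int → List Int → List Int
  | 0, _, ans => ans
  | fuel + 1, ds, ans =>
    if ds = [] then ans
    else
      let c := (ds.takeWhile (fun d => decide (d ≤ 0))).length
      simD fuel ((ds.drop c).map dec) (if 0 < c then ((c : Int) :: ans) else ans)

-- group sizes by running maximum (chronological order)
def groupsAux : List Int → Int → Int → List Int
  | [], _, c => [c]
  | d :: rest, l, c => if l < d then c :: groupsAux rest d 1 else groupsAux rest l (c + 1)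

def groups : List Int → List Int
  | [] => []
  | d :: rest => groupsAux rest d 1

def measureD (ds : List Int) : Nat := ds.length + (ds.map Int.toNat).sum

-- the per-task invariant Pre_ states for each (progress, speed) pair
def InvP (p s : Int) : Prop := 1 ≤ s ∨ (100 ≤ p ∧ 0 ≤ s)

-- day arithmetic ------------------------------------------------------------
lemma dayOf_char (p s : Int) (hp : ¬ 100 ≤ p) (hs : 1 ≤ s) :
    (dayOf p s - 1) * s < 100 - p ∧ 100 - p ≤ dayOf p s * s := by
  have h : -(PySem.Int.floordiv (-(100 - p)) s) = dayOf p s := by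
    simp [dayOf, hp]
  exact (PySem.Int.neg_floordiv_neg_eq_iff_of_pos (by omega)).mp h

lemma dayOf_pos (p s : Int) (hp : ¬ 100 ≤ p) (h : InvP p s) : 1 ≤ dayOf p s := by
  have hs : 1 ≤ s := by rcases h with h | h; exact h; omega
  obtain ⟨h1, h2⟩ := dayOf_char p s hp hs
  nlinarith

lemma dayOf_nonneg (p s : Int) (h : InvP p s) : 0 ≤ dayOf p s := by
  by_cases hp : 100 ≤ p
  · simp [dayOf, hp]
  · have := dayOf_pos p s hp h; omega

lemma dayOf_le_zero_iff (p s : Int) (h : InvP p s) : dayOf p s ≤ 0 ↔ 100 ≤ p := by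
  by_cases hp : 100 ≤ p
  · simp [dayOf, hp]
  · have := dayOf_pos p s hp h; constructor <;> intro <;> omega

lemma dayOf_step (p s : Int) (h : InvP p s) : dayOf (p + s) s = dec (dayOf p s) := by
  by_cases hp : 100 ≤ p
  · have hs : 0 ≤ s := by rcases h with h | h <;> omega
    have : 100 ≤ p + s := by omega
    simp [dayOf, hp, this, dec]
  · have hs : 1 ≤ s := by rcases h with h | h; exact h; omega
    have hq := dayOf_pos p s hp h
    obtain ⟨h1, h2⟩ := dayOf_char p s hp hs
    by_cases hps : 100 ≤ p + s
    · -- q = 1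
      have hq1 : dayOf p s ≤ 1 := by nlinarith
      have h3 : dayOf p s = 1 := le_antisymm hq1 hq
      rw [h3]; simp [dayOf, hps, dec]
    · have key : -(PySem.Int.floordiv (-(100 - (p + s))) s) = dayOf p s - 1 := by
        rw [PySem.Int.neg_floordiv_neg_eq_iff_of_pos (by omega)]
        constructor <;> nlinarith
      have : dayOf (p + s) s = dayOf p s - 1 := by
        rw [← key]; simp [dayOf, hps]
      rw [this, dec]; omega

lemma dayOf_le (p s : Int) (h : InvP p s) : (dayOf p s).toNat ≤ (100 - p).toNat := by
  by_cases hp : 100 ≤ p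
  · simp [dayOf, hp]
  · have hs : 1 ≤ s := by rcases h with h | h; exact h; omega
    have hq := dayOf_pos p s hp h
    obtain ⟨h1, h2⟩ := dayOf_char p s hp hs
    have : dayOf p s ≤ 100 - p := by nlinarith
    omega

lemma InvP_step (p s : Int) (h : InvP p s) : InvP (p + s) s := by
  rcases h with h | h
  · exact Or.inl h
  · exact Or.inr ⟨by omega, h.2⟩

-- list plumbing -------------------------------------------------------------
lemma drop_takeWhile_length {α : Type} (p : α → Bool) (l : List α) :
    l.drop (l.takeWhile p).length = l.dropWhile p := by
  induction l with
  | nil => rfl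
  | cons a t ih => simp only [List.takeWhile, List.dropWhile]; split <;> simp [ih]

lemma zip_zipWith_add (ps ss : List Int) :
    (List.zipWith (· + ·) ps ss).zip ss = (ps.zip ss).map (fun x => (x.1 + x.2, x.2)) := by
  induction ps generalizing ss with
  | nil => simp
  | cons p pt ih => cases ss with
    | nil => simp
    | cons s st => simp [ih]

lemma zip_drop (ps ss : List Int) (c : Nat) :
    (ps.zip ss).drop c = (ps.drop c).zip (ss.drop c) := by
  simp [List.zip, List.drop_zipWith]

lemma takeWhile_days (ps ss : List Int)
    (h : ∀ x ∈ ps.zip ss, InvP x.1 x.2) (hlen : ps.length ≤ ss.length) :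
    ((days ps ss).takeWhile (fun d => decide (d ≤ 0))).length
      = (ps.takeWhile (fun i => decide (100 ≤ i))).length := by
  induction ps generalizing ss with
  | nil => simp [days]
  | cons p pt ih =>
    cases ss with
    | nil => simp at hlen
    | cons s st =>
      have hhead : InvP p s := h (p, s) (by simp)
      have hiff := dayOf_le_zero_iff p s hhead
      simp only [days, List.zip_cons_cons, List.map_cons, List.takeWhile_cons]
      by_cases hp : 100 ≤ p
      · have : dayOf p s ≤ 0 := hiff.mpr hp
        simp only [this, hp, decide_true]
        have := ih st (fun x hx => h x (by simp [hx])) (by simpa using hlen)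
        simpa [days] using this
      · have : ¬ dayOf p s ≤ 0 := fun hc => hp (hiff.mp hc)
        simp [this, hp]

lemma days_length (ps ss : List Int) (hlen : ps.length ≤ ss.length) :
    (days ps ss).length = ps.length := by
  simp [days, List.length_zip]; omega

-- A's loop equals the abstract day simulation -------------------------------
lemma loopA_eq_simD (fuel : Nat) (ps ss ans : List Int)
    (h : ∀ x ∈ ps.zip ss, InvP x.1 x.2) (hlen : ps.length ≤ ss.length) :
    loopA fuel ps ss ans = simD fuel (days ps ss) ans := by
  induction fuel generalizing ps ss ans with
  | zero => rfl
  | succ fuel ih =>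
    simp only [loopA, simD]
    have hempty : (days ps ss = []) ↔ (ps = []) := by
      rw [← List.length_eq_zero_iff, ← List.length_eq_zero_iff, days_length ps ss hlen]
    by_cases hps : ps = []
    · simp [hps, days]
    · rw [if_neg hps, if_neg (fun hc => hps (hempty.mp hc))]
      rw [takeWhile_days ps ss h hlen]
      set c := (ps.takeWhile (fun i => decide (100 ≤ i))).length with hc
      have hdays_drop : (days ps ss).drop c = days (ps.drop c) (ss.drop c) := by
        simp [days, ← List.map_drop, zip_drop]
      have hsub : (ps.drop c).zip (ss.drop c) = (ps.zip ss).drop c := (zip_drop ps ss c).symm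
      have hmem1 : ∀ x ∈ (ps.drop c).zip (ss.drop c), InvP x.1 x.2 := by
        intro x hx
        rw [hsub] at hx
        exact h x (List.mem_of_mem_drop hx)
      have hlen1 : (ps.drop c).length ≤ (ss.drop c).length := by
        simp [List.length_drop]; omega
      have hnew : days (List.zipWith (· + ·) (ps.drop c) (ss.drop c)) (ss.drop c)
          = (days (ps.drop c) (ss.drop c)).map dec := by
        simp only [days, zip_zipWith_add, List.map_map]
        exact List.map_congr_left (fun x hx => dayOf_step x.1 x.2 (hmem1 x hx))
      have hmem2 : ∀ x ∈ (List.zipWith (· + ·) (ps.drop c) (ss.drop c)).zip (ss.drop c), InvP x.1 x.2 := by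
        intro x hx
        rw [zip_zipWith_add] at hx
        obtain ⟨y, hy, rfl⟩ := List.mem_map.mp hx
        exact InvP_step y.1 y.2 (hmem1 y hy)
      have hlen2 : (List.zipWith (· + ·) (ps.drop c) (ss.drop c)).length ≤ (ss.drop c).length := by
        simp [List.length_zipWith]
      rw [ih _ _ _ hmem2 hlen2, hdays_drop, hnew]

-- the abstract simulation computes the groups -------------------------------
lemma groupsAux_dec (ds : List Int) (l c : Int) (hds : ∀ d ∈ ds, 0 ≤ d) (hl : 1 ≤ l) :
    groupsAux (ds.map dec) (dec l) c = groupsAux ds l c := by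
  induction ds generalizing l c with
  | nil => rfl
  | cons d rest ih =>
    have hd : 0 ≤ d := hds d (by simp)
    have hrest : ∀ x ∈ rest, 0 ≤ x := fun x hx => hds x (by simp [hx])
    simp only [List.map_cons, groupsAux]
    by_cases hld : l < d
    · rw [if_pos hld, if_pos (by simp [dec]; omega)]
      rw [ih d 1 hrest (by omega)]
    · rw [if_neg hld, if_neg (by simp [dec]; omega)]
      exact ih l (c + 1) hrest hl

lemma groupsAux_zeros (ds : List Int) (k : Int) (hds : ∀ d ∈ ds, 0 ≤ d) :
    groupsAux ds 0 k =
      (k + ((ds.takeWhile (fun d => decide (d ≤ 0))).length : Int))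
        :: groups (ds.drop (ds.takeWhile (fun d => decide (d ≤ 0))).length) := by
  induction ds generalizing k with
  | nil => simp [groupsAux, groups]
  | cons d rest ih =>
    have hd : 0 ≤ d := hds d (by simp)
    have hrest : ∀ x ∈ rest, 0 ≤ x := fun x hx => hds x (by simp [hx])
    by_cases hdz : d ≤ 0
    · have : ¬ (0 : Int) < d := by omega
      simp only [groupsAux, if_neg this, List.takeWhile_cons, hdz, decide_true]
      rw [ih (k + 1) hrest]
      congr 1
      simp only [if_true, List.length_cons]
      push_cast
      ring
    · simp only [groupsAux, if_pos (by omega : (0:Int) < d), List.takeWhile_cons]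
      simp [hdz, groups]

lemma groups_dec (ds : List Int) (hds : ∀ d ∈ ds, 0 ≤ d)
    (hhead : ∀ h : ds ≠ [], 1 ≤ ds.head h) :
    groups (ds.map dec) = groups ds := by
  cases ds with
  | nil => rfl
  | cons d rest =>
    simp only [List.map_cons, groups]
    exact groupsAux_dec rest d 1 (fun x hx => hds x (by simp [hx])) (hhead (by simp))

lemma toNat_dec_le (d : Int) : (dec d).toNat ≤ d.toNat := by simp [dec]; omega

lemma measureD_map_dec_le (ds : List Int) : measureD (ds.map dec) ≤ measureD ds := by
  unfold measureD
  simp only [List.length_map, List.map_map]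
  have : ((ds.map (Int.toNat ∘ dec)).sum ≤ (ds.map Int.toNat).sum) :=
    List.sum_le_sum (fun d _ => toNat_dec_le d)
  omega

lemma measureD_append (t r : List Int) : measureD (t ++ r) = measureD t + measureD r := by
  unfold measureD
  simp [List.length_append, List.map_append, List.sum_append]
  omega

lemma measureD_split (ds : List Int) (hds : ∀ d ∈ ds, 0 ≤ d) :
    measureD ds
      = (ds.takeWhile (fun d => decide (d ≤ 0))).length
        + measureD (ds.drop (ds.takeWhile (fun d => decide (d ≤ 0))).length) := by
  rw [drop_takeWhile_length]
  conv_lhs => rw [← List.takeWhile_append_dropWhile (p := fun d => decide (d ≤ 0)) (l := ds)]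
  rw [measureD_append]
  congr 1
  unfold measureD
  have hz : ∀ x ∈ (ds.takeWhile (fun d => decide (d ≤ 0))).map Int.toNat, x = 0 := by
    intro x hx
    obtain ⟨d, hd, rfl⟩ := List.mem_map.mp hx
    have h1 : d ≤ 0 := by simpa using List.mem_takeWhile_imp hd
    have h2 : 0 ≤ d := hds d ((List.takeWhile_sublist _).subset hd)
    omega
  rw [List.sum_eq_zero hz]
  omega

lemma measureD_map_dec_lt (d : Int) (rest : List Int) (hd : 1 ≤ d) :
    measureD ((d :: rest).map dec) < measureD (d :: rest) := by
  unfold measureD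
  simp only [List.map_cons, List.length_cons, List.length_map, List.sum_cons, List.map_map]
  have h1 : (dec d).toNat < d.toNat := by simp [dec]; omega
  have h2 : ((rest.map (Int.toNat ∘ dec)).sum ≤ (rest.map Int.toNat).sum) :=
    List.sum_le_sum (fun x _ => toNat_dec_le x)
  omega

lemma simD_eq_groups (fuel : Nat) (ds ans : List Int)
    (hds : ∀ d ∈ ds, 0 ≤ d) (hfuel : measureD ds < fuel) :
    simD fuel ds ans = (groups ds).reverse ++ ans := by
  induction fuel generalizing ds ans with
  | zero => omega
  | succ fuel ih =>
    cases ds with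
    | nil => simp [simD, groups]
    | cons d rest =>
      have hd : 0 ≤ d := hds d (by simp)
      have hrest : ∀ x ∈ rest, 0 ≤ x := fun x hx => hds x (by simp [hx])
      simp only [simD, if_neg (List.cons_ne_nil d rest)]
      by_cases hd0 : d ≤ 0
      · have hdz : d = 0 := by omega
        subst hdz
        -- count = tR + 1 where tR counts rest's ready prefix
        simp only [List.takeWhile_cons, decide_true, le_refl, if_true, List.length_cons,
          List.drop_succ_cons, if_pos (Nat.succ_pos _)]
        rw [drop_takeWhile_length]
        have hr : ∀ x ∈ rest.dropWhile (fun d => decide (d ≤ 0)), 0 ≤ x :=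
          fun x hx => hrest x ((List.dropWhile_sublist _).subset hx)
        have hrd : ∀ x ∈ (rest.dropWhile (fun d => decide (d ≤ 0))).map dec, 0 ≤ x := by
          intro x hx
          obtain ⟨y, _, rfl⟩ := List.mem_map.mp hx
          simp [dec]
        have hhead : ∀ h : rest.dropWhile (fun d => decide (d ≤ 0)) ≠ [],
            1 ≤ (rest.dropWhile (fun d => decide (d ≤ 0))).head h := by
          intro h
          have h0 : 0 < (rest.dropWhile (fun d => decide (d ≤ 0))).length :=
            List.length_pos_iff.mpr h
          have := List.dropWhile_get_zero_not (p := fun d => decide (d ≤ 0)) rest h0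
          rw [List.head_eq_getElem]
          have hmem : (rest.dropWhile (fun d => decide (d ≤ 0)))[0] ∈
              rest.dropWhile (fun d => decide (d ≤ 0)) := List.getElem_mem _
          have := hr _ hmem
          simp_all
          omega
        have hmeas : measureD ((rest.dropWhile (fun d => decide (d ≤ 0))).map dec) < fuel := by
          have hs := measureD_split (0 :: rest) (by intro x hx; rcases List.mem_cons.mp hx with rfl | hx; omega; exact hrest x hx)
          simp only [List.takeWhile_cons, decide_true, le_refl, List.length_cons,
            List.drop_succ_cons, if_pos] at hs
          rw [drop_takeWhile_length] at hs
          have := measureD_map_dec_le (rest.dropWhile (fun d => decide (d ≤ 0)))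
          omega
        rw [ih _ _ hrd hmeas]
        rw [groups, groupsAux_zeros rest 1 hrest, drop_takeWhile_length,
            groups_dec _ hr hhead]
        simp only [List.reverse_cons, List.append_assoc, List.cons_append, List.nil_append]
        congr 2
        push_cast
        ring
      · -- count = 0 : pure decrement step
        have h1d : 1 ≤ d := by omega
        have hP : (decide (d ≤ 0)) = false := by simp [hd0]
        simp only [List.takeWhile_cons, hP, Bool.false_eq_true, if_false,
          List.length_nil, List.drop_zero, if_neg (lt_irrefl 0)]
        have hnn : ∀ x ∈ (d :: rest).map dec, 0 ≤ x := by
          intro x hx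
          obtain ⟨y, _, rfl⟩ := List.mem_map.mp hx
          simp [dec]
        have hmeas := measureD_map_dec_lt d rest h1d
        rw [ih _ _ hnn (by omega)]
        rw [groups_dec _ hds (by intro h; simpa using h1d)]

-- B's loop computes the groups ----------------------------------------------
lemma loopB_eq_groupsAux (pairs : List (Int × Int)) (l c : Int) (ans : List Int) (hc : 1 ≤ c) :
    loopB pairs (some l) c ans = ans ++ groupsAux (pairs.map (fun x => dayOf x.1 x.2)) l c := by
  induction pairs generalizing l c ans with
  | nil => simp [loopB, groupsAux]; omega
  | cons x rest ih =>
    obtain ⟨p, s⟩ := x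
    simp only [loopB, List.map_cons, groupsAux]
    by_cases hld : l < dayOf p s
    · rw [if_pos hld, if_pos hld, if_pos (by omega : c ≠ 0), ih _ _ _ (by omega)]
      simp
    · rw [if_neg hld, if_neg hld, ih _ _ _ (by omega)]

lemma solution_alt_eq_groups (ps ss : List Int) :
    solution_alt ps ss = groups (days ps ss) := by
  unfold solution_alt
  cases h : ps.zip ss with
  | nil => simp [loopB, days, h, groups]
  | cons x rest =>
    obtain ⟨p, s⟩ := x
    simp only [loopB]
    rw [loopB_eq_groupsAux _ _ _ _ (by omega)]
    simp [days, h, groups]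

-- the fuel suffices ---------------------------------------------------------
lemma measureD_days_lt (ps ss : List Int)
    (h : ∀ x ∈ ps.zip ss, InvP x.1 x.2) (hlen : ps.length ≤ ss.length) :
    measureD (days ps ss) < fuelA ps := by
  unfold measureD fuelA
  have hl : (days ps ss).length = ps.length := by simp [days, List.length_zip]; omega
  have hsum : ((days ps ss).map Int.toNat).sum ≤ (ps.map (fun p => (100 - p).toNat)).sum := by
    have hps : ps.map (fun p => (100 - p).toNat) = (ps.zip ss).map (fun x => (100 - x.1).toNat) := by
      conv_lhs => rw [← List.map_fst_zip hlen]
      rw [List.map_map]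
      rfl
    rw [hps]
    simp only [days, List.map_map]
    exact List.sum_le_sum (fun x hx => dayOf_le x.1 x.2 (h x hx))
  omega

-- ===== VERDICT (by name: the statement is the Claim_ definition above) =====
theorem solution_spec : Claim_equal_solution := by
  intro ps ss _hdom hpre
  obtain ⟨hlen, hinv⟩ := hpre
  have hinv' : ∀ x ∈ ps.zip ss, InvP x.1 x.2 := fun x hx => hinv x hx
  have hnn : ∀ d ∈ days ps ss, 0 ≤ d := by
    intro d hd
    simp only [days, List.mem_map] at hd
    obtain ⟨x, hx, rfl⟩ := hd
    exact dayOf_nonneg _ _ (hinv' x hx)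
  unfold Spec_solution solution
  rw [loopA_eq_simD _ _ _ _ hinv' hlen,
      simD_eq_groups _ _ _ hnn (measureD_days_lt _ _ hinv' hlen),
      solution_alt_eq_groups]
  simp
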